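-- pv_equiv track=rewrite | github.com/deeppavlov/learning-to-learn | learning_to_learn/useful_functions.py | create_distribute_map
-- ===== SOURCE A (Python) =====
-- import itertools
--
-- def create_distribute_map(num_distributed, result_length):
--     div = result_length // num_distributed
--     mod = result_length % num_distributed
--     if num_distributed < result_length:
--         num_repeats = [div] * num_distributed
--         for i in range(mod):
--             num_repeats[i] += 1
--     else:
--         num_repeats = [1] * result_length
--     map_ = list(itertools.chain(*[[i] * n_rep for i, n_rep in enumerate(num_repeats)]))
--     return map_
-- ===== SOURCE B (Python) =====
-- def create_distribute_map(num_distributed, result_length):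
--     div, mod = divmod(result_length, num_distributed)
--     if num_distributed >= result_length:
--         return list(range(result_length))
--     boundary = mod * (div + 1)
--     return [p // (div + 1) if p < boundary else mod + (p - boundary) // div
--             for p in range(result_length)]
-- ===== Notes on version B (the rewrite author's own statement) =====
-- stated objective: faster
-- what changed: B computes each output position's slot directly via a boundary formula (p//(div+1) below boundary=mod*(div+1), else mod+(p-boundary)//div) instead of building a per-slot repeat-count list and chaining repeated run lists (no intermediate lists are materialized); Pre_ restricts to the natural domain num_distributed >= 1 (A raises ZeroDivisionError at 0, and for negative num_distributed A's empty result is an accident of Python's negative list multiplication).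
-- outside the precondition, e.g. on create_distribute_map(-2, 5): A returns [], B returns [0, -1, -1, -2, -2]; on create_distribute_map(0, 5): A raises ZeroDivisionError, B raises ZeroDivisionError
import Mathlib
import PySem

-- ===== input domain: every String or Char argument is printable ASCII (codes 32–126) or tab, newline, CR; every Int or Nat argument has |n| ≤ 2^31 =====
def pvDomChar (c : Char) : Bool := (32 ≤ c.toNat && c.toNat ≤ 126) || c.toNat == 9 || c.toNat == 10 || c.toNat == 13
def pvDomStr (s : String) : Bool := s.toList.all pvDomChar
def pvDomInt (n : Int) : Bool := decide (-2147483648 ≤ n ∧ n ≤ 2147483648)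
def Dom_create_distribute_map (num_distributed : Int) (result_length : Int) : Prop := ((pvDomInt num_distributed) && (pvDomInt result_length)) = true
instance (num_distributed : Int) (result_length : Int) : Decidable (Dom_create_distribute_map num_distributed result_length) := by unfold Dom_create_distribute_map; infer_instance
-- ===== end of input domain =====

-- B computes each output position's slot directly with a boundary formula instead of
-- building a per-slot repeat-count list and chaining the repeated runs (alternative decomposition).

-- ===== PORT A =====
def create_distribute_map (num_distributed : Int) (result_length : Int) : List Int :=
  let div := PySem.Int.floordiv result_length num_distributed
  let mod := PySem.Int.mod result_length num_distributed
  let num_repeats : List Int :=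
    if num_distributed < result_length then
      (PySem.List.pyRange 0 mod 1).foldl
        (fun l i => PySem.List.pySetD l i (PySem.List.pyGetD l i 0 + 1))
        (PySem.List.pyRepeat [div] num_distributed)
    else
      PySem.List.pyRepeat [(1 : Int)] result_length
  (PySem.List.enumerate num_repeats 0).flatMap
    (fun p => PySem.List.pyRepeat [p.1] p.2)

-- ===== PORT B =====
def create_distribute_map_alt (num_distributed : Int) (result_length : Int) : List Int :=
  let div := PySem.Int.floordiv result_length num_distributed
  let mod := PySem.Int.mod result_length num_distributed
  if num_distributed ≥ result_length then
    PySem.List.pyRange 0 result_length 1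
  else
    let boundary := mod * (div + 1)
    (PySem.List.pyRange 0 result_length 1).map (fun p =>
      if p < boundary then PySem.Int.floordiv p (div + 1)
      else mod + PySem.Int.floordiv (p - boundary) div)

-- ===== PRECONDITION & SPEC =====
-- Pre_ restricts to the natural domain num_distributed ≥ 1: at num_distributed = 0 the
-- Python A raises ZeroDivisionError, and for negative num_distributed A's empty result is
-- an accident of Python's negative list multiplication, outside the task's natural domain.
def Pre_create_distribute_map (num_distributed : Int) (result_length : Int) : Prop :=
  1 ≤ num_distributed
instance (num_distributed : Int) (result_length : Int) : Decidable (Pre_create_distribute_map num_distributed result_length) := by unfold Pre_create_distribute_map; infer_instance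

def pvWitness_create_distribute_map : Int × Int := (3, 8)

def Spec_create_distribute_map (num_distributed : Int) (result_length : Int) (out : List Int) : Prop := out = create_distribute_map_alt num_distributed result_length
instance (num_distributed : Int) (result_length : Int) (out : List Int) : Decidable (Spec_create_distribute_map num_distributed result_length out) := by unfold Spec_create_distribute_map; infer_instance

-- ===== CLAIM (what is proved, stated in full; the proofs are below) =====
def Claim_equal_create_distribute_map : Prop := ∀ (num_distributed : Int) (result_length : Int), Dom_create_distribute_map num_distributed result_length → Pre_create_distribute_map num_distributed result_length → Spec_create_distribute_map num_distributed result_length (create_distribute_map num_distributed result_length)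

-- ===== LEMMAS AND PROOFS =====

-- enumerate distributes over append
theorem pv_enumerate_append {α : Type} (xs ys : List α) (s : Int) :
    PySem.List.enumerate (xs ++ ys) s
      = PySem.List.enumerate xs s ++ PySem.List.enumerate ys (s + xs.length) := by
  induction xs generalizing s with
  | nil => simp [PySem.List.enumerate_nil]
  | cons x xs ih =>
      simp [PySem.List.enumerate_cons, ih, add_assoc]
      ring_nf

-- A's increment loop turns [d]*k into [d+1]*m ++ [d]*(k-m)
theorem pv_loop (k : Nat) (d : Int) :
    ∀ m : Nat, m ≤ k →
      (PySem.List.pyRange 0 (m : Int) 1).foldl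
          (fun l i => PySem.List.pySetD l i (PySem.List.pyGetD l i 0 + 1))
          (List.replicate k d)
        = List.replicate m (d + 1) ++ List.replicate (k - m) d := by
  intro m
  induction m with
  | zero => intro _; simp [PySem.List.pyRange_one_eq_nil]
  | succ m ih =>
      intro hmk
      have h0 : (0 : Int) ≤ (m : Int) := by positivity
      have hsplit : PySem.List.pyRange 0 ((m : Nat) + 1 : Int) 1
          = PySem.List.pyRange 0 (m : Int) 1 ++ [(m : Int)] :=
        PySem.List.pyRange_one_succ_right h0
      have hm : ((m + 1 : Nat) : Int) = ((m : Nat) : Int) + 1 := by push_cast; ring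
      rw [hm, hsplit, List.foldl_append, ih (by omega)]
      simp only [List.foldl_cons, List.foldl_nil]
      rw [PySem.List.pySetD_natCast]
      have hget : PySem.List.pyGetD
          (List.replicate m (d + 1) ++ List.replicate (k - m) d) ((m : Nat) : Int) 0 = d := by
        rw [PySem.List.pyGetD_natCast]
        rw [List.getD_eq_getElem?_getD, List.getElem?_append_right (by simp)]
        have hlt : 0 < k - m := by omega
        simp [hlt]
      rw [hget]
      rw [List.set_append_right _ _ (by simp)]
      simp only [List.length_replicate, Nat.sub_self]
      have hset : (List.replicate (k - m) d).set 0 (d + 1)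
          = (d + 1) :: List.replicate (k - m - 1) d := by
        have hk : k - m = (k - m - 1) + 1 := by omega
        rw [hk]; simp [List.replicate_succ]
      rw [hset]
      have hk2 : k - (m + 1) = k - m - 1 := by omega
      rw [hk2, List.replicate_succ']
      simp

-- a run of n slots each repeated c times, starting at slot s, as a division map
theorem pv_block (c : Nat) (hc : 0 < c) :
    ∀ (n : Nat) (s : Int),
      (PySem.List.enumerate (List.replicate n ((c : Nat) : Int)) s).flatMap
          (fun p => PySem.List.pyRepeat [p.1] p.2)
        = (List.range (n * c)).map (fun q => s + ((q / c : Nat) : Int)) := by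
  intro n
  induction n with
  | zero => intro s; simp [PySem.List.enumerate_nil]
  | succ n ih =>
      intro s
      rw [List.replicate_succ, PySem.List.enumerate_cons]
      rw [List.flatMap_cons, ih (s + 1)]
      have hrep : PySem.List.pyRepeat [s] ((c : Nat) : Int) = List.replicate c s := by
        rw [PySem.List.pyRepeat_singleton]; simp
      have hrange : (n + 1) * c = c + n * c := by ring
      rw [hrep, hrange, List.range_add, List.map_append]
      congr 1
      · symm
        apply List.eq_replicate_iff.mpr
        refine ⟨by simp, ?_⟩
        intro b hb
        simp only [List.mem_map, List.mem_range] at hb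
        obtain ⟨q, hq, rfl⟩ := hb
        rw [Nat.div_eq_of_lt hq]; simp
      · rw [List.map_map]
        apply List.map_congr_left
        intro q hq
        simp only [Function.comp_apply]
        have hdiv : (c + q) / c = q / c + 1 := by
          rw [Nat.add_comm c q, Nat.add_div_right _ hc]
        rw [hdiv]; push_cast; ring

-- ===== VERDICT (by name: the statement is the Claim_ definition above) =====
theorem create_distribute_map_spec : Claim_equal_create_distribute_map := by
  intro nd rl _ hnd
  have hndpos : (0 : Int) < nd := by exact_mod_cast hnd
  unfold Spec_create_distribute_map
  simp only [create_distribute_map, create_distribute_map_alt]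
  by_cases hlt : nd < rl
  · -- general case: nd < rl
    have hmodnn : 0 ≤ PySem.Int.mod rl nd := PySem.Int.mod_nonneg rl hndpos
    have hmodlt : PySem.Int.mod rl nd < nd := PySem.Int.mod_lt rl hndpos
    have hid : PySem.Int.floordiv rl nd * nd + PySem.Int.mod rl nd = rl :=
      PySem.Int.floordiv_mul_add_mod rl nd
    have hdpos : 0 < PySem.Int.floordiv rl nd := by nlinarith
    set k := nd.toNat with hkdef
    set m := (PySem.Int.mod rl nd).toNat with hmdef
    set c1 := (PySem.Int.floordiv rl nd + 1).toNat with hc1def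
    set c2 := (PySem.Int.floordiv rl nd).toNat with hc2def
    have hknd : ((k : Nat) : Int) = nd := by omega
    have hmmod : ((m : Nat) : Int) = PySem.Int.mod rl nd := by omega
    have hc1 : ((c1 : Nat) : Int) = PySem.Int.floordiv rl nd + 1 := by omega
    have hc2 : ((c2 : Nat) : Int) = PySem.Int.floordiv rl nd := by omega
    have hc12 : c1 = c2 + 1 := by omega
    have hmk : m ≤ k := by omega
    have hrlnat : rl = ((k * c2 + m : Nat) : Int) := by
      push_cast
      rw [hc2, hmmod, hknd, mul_comm]
      omega
    rw [if_pos hlt, if_neg (by omega : ¬ nd ≥ rl)]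
    rw [PySem.List.pyRepeat_singleton, ← hkdef, ← hmmod]
    rw [pv_loop k _ m hmk]
    rw [pv_enumerate_append, List.flatMap_append]
    rw [← hc1, ← hc2]
    rw [pv_block c1 (by omega) m 0]
    simp only [List.length_replicate]
    rw [pv_block c2 (by omega) (k - m) ((0 : Int) + (m : Int))]
    -- B side: split the range at the boundary
    have hbnd : ((m : Nat) : Int) * ((c1 : Nat) : Int) = ((m * c1 : Nat) : Int) := by
      push_cast; ring
    have hble : ((m * c1 : Nat) : Int) ≤ rl := by
      rw [hrlnat]
      have h1 : m * c1 ≤ k * c2 + m := by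
        have h2 : m * c2 ≤ k * c2 := Nat.mul_le_mul_right c2 hmk
        calc m * c1 = m * c2 + m := by rw [hc12]; ring
        _ ≤ k * c2 + m := by omega
      exact_mod_cast h1
    rw [hbnd]
    rw [PySem.List.pyRange_one_append 0 ((m * c1 : Nat) : Int) rl (by positivity) hble,
        List.map_append]
    congr 1
    · -- first segment
      have hmc : (((m * c1 : Nat) : Int) - 0).toNat = m * c1 := by omega
      rw [PySem.List.pyRange_one, hmc, List.map_map]
      apply List.map_congr_left
      intro q hq
      simp only [List.mem_range] at hq
      simp only [Function.comp_apply, zero_add]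
      rw [if_pos (by exact_mod_cast hq)]
      rw [PySem.Int.floordiv_natCast]
    · -- second segment
      have hlen : (rl - ((m * c1 : Nat) : Int)).toNat = (k - m) * c2 := by
        rw [hrlnat]
        have : k * c2 + m - m * c1 = (k - m) * c2 := by
          rw [hc12]
          have h2 : m * c2 ≤ k * c2 := Nat.mul_le_mul_right c2 hmk
          calc k * c2 + m - m * (c2 + 1) = k * c2 + m - (m * c2 + m) := by ring_nf
          _ = k * c2 - m * c2 := by omega
          _ = (k - m) * c2 := by rw [Nat.sub_mul]
        omega
      rw [PySem.List.pyRange_one, hlen, List.map_map]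
      apply List.map_congr_left
      intro q hq
      simp only [List.mem_range] at hq
      simp only [Function.comp_apply]
      rw [if_neg (by push_cast; omega)]
      rw [add_sub_cancel_left, PySem.Int.floordiv_natCast]
      simp
  · -- trivial case: nd ≥ rl, one index per slot
    rw [if_neg hlt, if_pos (by omega : nd ≥ rl)]
    rw [PySem.List.pyRepeat_singleton]
    rw [show List.replicate rl.toNat (1 : Int) = List.replicate rl.toNat ((1 : Nat) : Int) from by
      norm_num]
    rw [pv_block 1 (by norm_num) rl.toNat 0]
    rw [PySem.List.pyRange_one]
    simp [Nat.div_one]
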